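-- pv_equiv track=rewrite | github.com/neelsomani/known-falsehood-mechinterp | scripts/capture_activations.py | spans_to_token_index
-- ===== SOURCE A (Python) =====
-- def spans_to_token_index(offsets: list[tuple[int, int]], span: tuple[int, int]) -> int | None:
--     span_start, span_end = span
--     last_idx = None
--     for idx, (start, end) in enumerate(offsets):
--         if start == end:
--             continue
--         if end > span_start and start < span_end:
--             last_idx = idx
--     return last_idx
-- ===== SOURCE B (Python) =====
-- def spans_to_token_index(offsets: list[tuple[int, int]], span: tuple[int, int]) -> int | None:
--     span_start, span_end = span
--     for idx, (start, end) in reversed(list(enumerate(offsets))):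
--         if start == end:
--             continue
--         if end > span_start and start < span_end:
--             return idx
--     return None
-- ===== Notes on version B (the rewrite author's own statement) =====
-- stated objective: alternative
-- what changed: Replaces the full forward scan with a last_idx accumulator by a reverse index scan that returns the first overlapping non-empty token immediately (early exit, no accumulator).
import Mathlib
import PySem

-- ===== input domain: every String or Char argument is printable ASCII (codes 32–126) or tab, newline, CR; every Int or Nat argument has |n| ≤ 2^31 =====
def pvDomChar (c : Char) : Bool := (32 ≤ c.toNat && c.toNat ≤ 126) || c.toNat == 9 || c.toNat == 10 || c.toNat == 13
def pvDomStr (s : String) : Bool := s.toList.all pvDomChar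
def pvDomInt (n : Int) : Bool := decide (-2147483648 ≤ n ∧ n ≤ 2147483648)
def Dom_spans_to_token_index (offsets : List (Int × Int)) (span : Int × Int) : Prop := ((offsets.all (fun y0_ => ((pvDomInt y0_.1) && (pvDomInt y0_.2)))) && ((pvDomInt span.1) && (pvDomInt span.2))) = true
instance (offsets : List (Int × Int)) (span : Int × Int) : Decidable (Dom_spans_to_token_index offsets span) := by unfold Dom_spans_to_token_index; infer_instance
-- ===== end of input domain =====

-- B replaces A's full forward scan with a last_idx accumulator by a reverse scan
-- over the enumerated offsets that returns the first overlapping non-empty token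
-- immediately (early exit, no accumulator). Objective: alternative decomposition.

-- ===== PORT A =====
-- the for-loop over enumerate(offsets) carrying last_idx, as a foldl
def spans_to_token_index (offsets : List (Int × Int)) (span : Int × Int) : Option Int :=
  (PySem.List.enumerate offsets).foldl
    (fun last_idx p =>
      let idx := p.1
      let start := p.2.1
      let «end» := p.2.2
      if start = «end» then last_idx
      else if «end» > span.1 ∧ start < span.2 then some idx
      else last_idx)
    none

-- ===== PORT B =====
-- the loop body of B: scan the (already reversed) enumerated list, return on first hit
def stti_revScan (span_start span_end : Int) : List (Int × (Int × Int)) → Option Int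
  | [] => none
  | (idx, (start, «end»)) :: rest =>
    if start = «end» then stti_revScan span_start span_end rest
    else if «end» > span_start ∧ start < span_end then some idx
    else stti_revScan span_start span_end rest

def spans_to_token_index_alt (offsets : List (Int × Int)) (span : Int × Int) : Option Int :=
  stti_revScan span.1 span.2 (PySem.List.enumerate offsets).reverse

-- ===== PRECONDITION & SPEC =====
def Spec_spans_to_token_index (offsets : List (Int × Int)) (span : Int × Int) (out : Option Int) : Prop := out = spans_to_token_index_alt offsets span
instance (offsets : List (Int × Int)) (span : Int × Int) (out : Option Int) : Decidable (Spec_spans_to_token_index offsets span out) := by unfold Spec_spans_to_token_index; infer_instance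

-- ===== CLAIM (what is proved, stated in full; the proofs are below) =====
def Claim_equal_spans_to_token_index : Prop := ∀ (offsets : List (Int × Int)) (span : Int × Int), Dom_spans_to_token_index offsets span → Spec_spans_to_token_index offsets span (spans_to_token_index offsets span)

-- ===== LEMMAS AND PROOFS =====

-- first-match scan distributes over append
theorem stti_revScan_append (a b : Int) (u v : List (Int × (Int × Int))) :
    stti_revScan a b (u ++ v) =
      match stti_revScan a b u with
      | some i => some i
      | none => stti_revScan a b v := by
  induction u with
  | nil => simp [stti_revScan]
  | cons x t ih =>
    obtain ⟨i, s, e⟩ := x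
    simp only [List.cons_append, stti_revScan]
    split_ifs <;> simp [ih]

-- A's fold from any accumulator equals the reverse first-match, defaulting to the accumulator
theorem stti_fold_eq (a b : Int) (l : List (Int × (Int × Int))) (acc : Option Int) :
    l.foldl
      (fun last_idx p =>
        let idx := p.1
        let start := p.2.1
        let «end» := p.2.2
        if start = «end» then last_idx
        else if «end» > a ∧ start < b then some idx
        else last_idx)
      acc =
      match stti_revScan a b l.reverse with
      | some i => some i
      | none => acc := by
  induction l generalizing acc with
  | nil => simp [stti_revScan]
  | cons x t ih =>
    obtain ⟨i, s, e⟩ := x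
    simp only [List.foldl_cons, List.reverse_cons, stti_revScan_append, ih]
    cases h : stti_revScan a b t.reverse with
    | some j => simp
    | none => simp only [stti_revScan]; split_ifs <;> simp

-- ===== VERDICT (by name: the statement is the Claim_ definition above) =====
theorem spans_to_token_index_spec : Claim_equal_spans_to_token_index := by
  intro offsets span _
  unfold Spec_spans_to_token_index spans_to_token_index spans_to_token_index_alt
  rw [stti_fold_eq]
  cases h : stti_revScan span.1 span.2 (PySem.List.enumerate offsets).reverse <;> simp
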